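-- pv_equiv track=rewrite | github.com/codenameone/CodenameOne | scripts/website/find_suspicious_inline_code.py | code_spans
-- ===== SOURCE A (Python) =====
-- def code_spans(line: str) -> list[tuple[int, int]]:
--     spans: list[tuple[int, int]] = []
--     i = 0
--     while i < len(line):
--         s = line.find("`", i)
--         if s < 0:
--             break
--         e = line.find("`", s + 1)
--         if e < 0:
--             break
--         spans.append((s, e + 1))
--         i = e + 1
--     return spans
-- ===== SOURCE B (Python) =====
-- def code_spans(line: str) -> list[tuple[int, int]]:
--     # gather-then-pair: collect all backtick positions in one scan, then
--     # pair them up consecutively; a trailing unpaired backtick is ignored.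
--     positions = [i for i, ch in enumerate(line) if ch == "`"]
--     it = iter(positions)
--     return [(s, e + 1) for s, e in zip(it, it)]
-- ===== Notes on version B (the rewrite author's own statement) =====
-- stated objective: simpler
-- what changed: Replaces the interleaved find-and-advance while loop with a two-pass gather-then-pair decomposition: one scan collects all backtick positions, then consecutive positions are paired into spans.
import Mathlib
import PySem

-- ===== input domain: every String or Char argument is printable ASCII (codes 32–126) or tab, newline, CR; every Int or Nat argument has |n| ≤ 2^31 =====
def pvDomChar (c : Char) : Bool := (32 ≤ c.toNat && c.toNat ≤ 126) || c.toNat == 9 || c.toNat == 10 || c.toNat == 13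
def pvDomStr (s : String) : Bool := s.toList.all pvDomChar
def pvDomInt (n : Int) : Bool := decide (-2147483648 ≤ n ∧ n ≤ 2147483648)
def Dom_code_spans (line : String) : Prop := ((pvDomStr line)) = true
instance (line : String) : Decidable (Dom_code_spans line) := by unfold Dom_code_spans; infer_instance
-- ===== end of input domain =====

-- B replaces A's interleaved find-and-advance scan with a gather-then-pair two-pass
-- decomposition (collect all backtick positions, then pair consecutive ones); objective: simpler.


-- ===== PORT A =====
-- A's while loop: s = line.find("`", i); e = line.find("`", s + 1); append (s, e + 1); i = e + 1.
-- line.find("`", k) is PySem.Chars.findFrom (exact); i only ever holds nonnegative values, kept as Nat.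
def codeSpansLoop (cs : List Char) (spans : List (Int × Int)) (i : Nat) : List (Int × Int) :=
  if h : i < cs.length then
    let s := PySem.Chars.findFrom cs ['`'] (i : Int)
    if hs : s < 0 then spans
    else
      let e := PySem.Chars.findFrom cs ['`'] ((s.toNat + 1 : Nat) : Int)
      if he : e < 0 then spans
      else codeSpansLoop cs (spans ++ [(s, e + 1)]) (e.toNat + 1)
  else spans
termination_by cs.length - i
decreasing_by
  have hs' : ¬ PySem.Chars.findFrom cs ['`'] (i : Int) < 0 := hs
  have hspec := PySem.Chars.findFrom_natCast_spec cs ['`'] i (le_of_lt h)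
    (by intro hc; rw [hc] at hs'; exact hs' (by norm_num))
  have _h1 : (i : Int) ≤ PySem.Chars.findFrom cs ['`'] (i : Int) := hspec.1
  have hlen : (PySem.Chars.findFrom cs ['`'] (i : Int)).toNat < cs.length := by
    have hpre := hspec.2.1
    have hne : cs.drop (PySem.Chars.findFrom cs ['`'] (i : Int)).toNat ≠ [] := by
      intro hnil; rw [hnil] at hpre; simp at hpre
    have := List.drop_eq_nil_iff.not.1 (by simpa using hne)
    omega
  have he' : ¬ PySem.Chars.findFrom cs ['`']
      (((PySem.Chars.findFrom cs ['`'] (i : Int)).toNat + 1 : Nat) : Int) < 0 := he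
  have hspec2 := PySem.Chars.findFrom_natCast_spec cs ['`']
    ((PySem.Chars.findFrom cs ['`'] (i : Int)).toNat + 1) (by omega)
    (by intro hc; rw [hc] at he'; exact he' (by norm_num))
  have _h2 : (((PySem.Chars.findFrom cs ['`'] (i : Int)).toNat + 1 : Nat) : Int) ≤
      PySem.Chars.findFrom cs ['`']
        (((PySem.Chars.findFrom cs ['`'] (i : Int)).toNat + 1 : Nat) : Int) := hspec2.1
  show cs.length - (PySem.Chars.findFrom cs ['`']
      (((PySem.Chars.findFrom cs ['`'] (i : Int)).toNat + 1 : Nat) : Int)).toNat.succ < cs.length - i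
  omega

def code_spans (line : String) : List (Int × Int) :=
  codeSpansLoop line.toList [] 0

-- ===== PORT B =====
-- Source B: positions = [i for i, ch in enumerate(line) if ch == "`"]; zip(it, it) pairs
-- consecutive positions (a trailing odd one is dropped) — pairTicks is that pairing.
def pairTicks : List Int → List (Int × Int)
  | s :: e :: rest => (s, e + 1) :: pairTicks rest
  | _ => []

def code_spans_alt (line : String) : List (Int × Int) :=
  pairTicks (((PySem.List.enumerate line.toList).filter (fun p => p.2 == '`')).map (·.1))

-- ===== PRECONDITION & SPEC =====
def Spec_code_spans (line : String) (out : List (Int × Int)) : Prop := out = code_spans_alt line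
instance (line : String) (out : List (Int × Int)) : Decidable (Spec_code_spans line out) := by unfold Spec_code_spans; infer_instance

-- ===== CLAIM (what is proved, stated in full; the proofs are below) =====
def Claim_equal_code_spans : Prop := ∀ (line : String), Dom_code_spans line → Spec_code_spans line (code_spans line)

-- ===== LEMMAS AND PROOFS =====

-- backtick positions of l, indices offset by n (proof-side reference)
def posIdx (n : Nat) : List Char → List Nat
  | [] => []
  | c :: cs => if c = '`' then n :: posIdx (n + 1) cs else posIdx (n + 1) cs

def pairNat : List Nat → List (Int × Int)
  | s :: e :: rest => ((s : Int), (e : Int) + 1) :: pairNat rest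
  | _ => []

theorem singleton_prefix_iff {a : Char} {l : List Char} : [a] <+: l ↔ l.head? = some a := by
  cases l with
  | nil => simp
  | cons b t =>
    constructor
    · rintro ⟨r, hr⟩; simp at hr ⊢; exact hr.1.symm
    · intro h; simp at h; exact ⟨t, by simp [h]⟩

theorem singleton_infix_iff {a : Char} {l : List Char} : [a] <:+: l ↔ a ∈ l := by
  constructor
  · rintro ⟨s, t, rfl⟩; simp
  · intro h
    obtain ⟨s, t, rfl⟩ := List.append_of_mem h
    exact ⟨s, t, by simp⟩

theorem tick_prefix_iff {l : List Char} {j : Nat} : ['`'] <+: l.drop j ↔ l[j]? = some '`' := by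
  rw [singleton_prefix_iff, List.head?_drop]

-- PySem.Chars.find for the single char '`', expressed via List.findIdx?
theorem find_tick (l : List Char) :
    PySem.Chars.find l ['`'] =
      match l.findIdx? (· == '`') with
      | none => -1
      | some j => (j : Int) := by
  cases hf : l.findIdx? (· == '`') with
  | none =>
    have hmem : '`' ∉ l := by
      intro hm
      have := (List.findIdx?_eq_none_iff).1 hf _ hm
      simp at this
    exact (PySem.Chars.find_eq_neg_one_iff l ['`']).2 (fun h => hmem (singleton_infix_iff.1 h))
  | some j =>
    obtain ⟨hjlt, hjget, hjmin⟩ := List.findIdx?_eq_some_iff_getElem.1 hf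
    have hjget' : l[j] = '`' := by simpa using hjget
    have hmem : '`' ∈ l := hjget' ▸ List.getElem_mem hjlt
    have hnn : 0 ≤ PySem.Chars.find l ['`'] :=
      (PySem.Chars.find_nonneg_iff l ['`']).2 (singleton_infix_iff.2 hmem)
    obtain ⟨hfpre, hfmin⟩ := PySem.Chars.find_spec hnn
    have hfget : l[(PySem.Chars.find l ['`']).toNat]? = some '`' := tick_prefix_iff.1 hfpre
    have hflt : (PySem.Chars.find l ['`']).toNat < l.length :=
      (List.getElem?_eq_some_iff.1 hfget).1
    have heq : (PySem.Chars.find l ['`']).toNat = j := by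
      rcases lt_trichotomy (PySem.Chars.find l ['`']).toNat j with hlt | heq | hgt
      · have := hjmin _ hlt
        simp [List.getElem?_eq_some_iff.1 hfget |>.2] at this
      · exact heq
      · exact absurd (tick_prefix_iff.2 (by simp [hjlt, hjget'])) (hfmin j hgt)
    show PySem.Chars.find l ['`'] = (j : Int)
    omega

-- findFrom at a Nat start, expressed via findIdx? on the dropped suffix
theorem findFrom_tick (cs : List Char) (k : Nat) (hk : k ≤ cs.length) :
    PySem.Chars.findFrom cs ['`'] (k : Int) =
      match (cs.drop k).findIdx? (· == '`') with
      | none => -1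
      | some j => ((k + j : Nat) : Int) := by
  rw [PySem.Chars.findFrom_natCast cs ['`'] k hk, find_tick]
  cases hf : (cs.drop k).findIdx? (· == '`') with
  | none => simp
  | some j =>
    show (if (j : Int) = -1 then (-1 : Int) else (k : Int) + (j : Int)) = ((k + j : Nat) : Int)
    rw [if_neg (by omega)]
    push_cast
    ring

theorem posIdx_of_none {l : List Char} (hf : l.findIdx? (· == '`') = none) (n : Nat) :
    posIdx n l = [] := by
  induction l generalizing n with
  | nil => rfl
  | cons c t ih =>
    rw [List.findIdx?_cons] at hf
    by_cases hc : c = '`'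
    · simp [hc] at hf
    · simp [posIdx, hc]
      exact ih (by simpa [hc] using hf) (n + 1)

theorem posIdx_of_some {l : List Char} {j : Nat} (hf : l.findIdx? (· == '`') = some j)
    (n : Nat) : posIdx n l = (n + j) :: posIdx (n + j + 1) (l.drop (j + 1)) := by
  induction l generalizing n j with
  | nil => simp at hf
  | cons c t ih =>
    rw [List.findIdx?_cons] at hf
    by_cases hc : c = '`'
    · simp [hc] at hf
      subst hf
      simp [posIdx, hc]
    · simp [hc] at hf
      obtain ⟨j', hj', rfl⟩ := hf
      have ht := ih hj' (n + 1)
      have h1 : n + 1 + j' = n + (j' + 1) := by omega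
      have h2 : n + 1 + j' + 1 = n + (j' + 1) + 1 := by omega
      simp only [posIdx, if_neg hc, List.drop_succ_cons, ht, h1]

-- the A-side loop computes pairNat of the remaining backtick positions
theorem loop_eq (cs : List Char) :
    ∀ d i spans, cs.length - i ≤ d → i ≤ cs.length →
      codeSpansLoop cs spans i = spans ++ pairNat (posIdx i (cs.drop i)) := by
  intro d
  induction d with
  | zero =>
    intro i spans hd hi
    have : i = cs.length := by omega
    rw [codeSpansLoop]
    simp [this, posIdx, pairNat]
  | succ d ih =>
    intro i spans hd hi
    rw [codeSpansLoop]
    by_cases h : i < cs.length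
    · simp only [dif_pos h]
      rw [findFrom_tick cs i hi]
      cases hf : (cs.drop i).findIdx? (· == '`') with
      | none =>
        simp [posIdx_of_none hf, pairNat]
      | some j =>
        have hjlt : j < (cs.drop i).length := (List.findIdx?_eq_some_iff_getElem.1 hf).1
        have hjlen : i + j + 1 ≤ cs.length := by simp at hjlt; omega
        have hdd : (cs.drop i).drop (j + 1) = cs.drop (i + j + 1) := by
          have hadd : i + (j + 1) = i + j + 1 := by omega
          rw [List.drop_drop, hadd]
        have hposIdx : posIdx i (cs.drop i) =
            (i + j) :: posIdx (i + j + 1) (cs.drop (i + j + 1)) := by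
          rw [posIdx_of_some hf, hdd]
        have hpos : ¬ (((i + j : Nat) : Int) < 0) := by omega
        simp only [hpos, dif_neg, not_false_iff]
        have htn : ((i + j : Nat) : Int).toNat + 1 = i + j + 1 := by omega
        rw [htn, findFrom_tick cs (i + j + 1) hjlen]
        cases hf2 : (cs.drop (i + j + 1)).findIdx? (· == '`') with
        | none =>
          simp [hposIdx, posIdx_of_none hf2, pairNat]
        | some j2 =>
          have hj2lt : j2 < (cs.drop (i + j + 1)).length :=
            (List.findIdx?_eq_some_iff_getElem.1 hf2).1
          have hj2len : i + j + 1 + j2 + 1 ≤ cs.length := by simp at hj2lt; omega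
          have hdd2 : (cs.drop (i + j + 1)).drop (j2 + 1) = cs.drop (i + j + 1 + j2 + 1) := by
            have hadd : i + j + 1 + (j2 + 1) = i + j + 1 + j2 + 1 := by omega
            rw [List.drop_drop, hadd]
          have hposIdx2 : posIdx (i + j + 1) (cs.drop (i + j + 1)) =
              (i + j + 1 + j2) :: posIdx (i + j + 1 + j2 + 1) (cs.drop (i + j + 1 + j2 + 1)) := by
            rw [posIdx_of_some hf2, hdd2]
          have hpos2 : ¬ (((i + j + 1 + j2 : Nat) : Int) < 0) := by omega
          simp only [hpos2, dif_neg, not_false_iff]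
          have htn2 : ((i + j + 1 + j2 : Nat) : Int).toNat + 1 = i + j + 1 + j2 + 1 := by omega
          rw [htn2, ih (i + j + 1 + j2 + 1) _ (by omega) (by omega)]
          rw [hposIdx, hposIdx2]
          simp only [pairNat, List.append_assoc, List.singleton_append]
    · simp only [dif_neg h]
      have : i = cs.length := by omega
      simp [this, posIdx, pairNat]

-- the B-side position list is posIdx, cast to Int
theorem enum_filter (cs : List Char) : ∀ n : Nat,
    ((PySem.List.enumerate cs (n : Int)).filter (fun p => p.2 == '`')).map (·.1) =
      (posIdx n cs).map (Nat.cast : Nat → Int) := by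
  induction cs with
  | nil => intro n; simp [PySem.List.enumerate_nil, posIdx]
  | cons c t ih =>
    intro n
    rw [PySem.List.enumerate_cons]
    have hcast : ((n : Int) + 1) = ((n + 1 : Nat) : Int) := by push_cast; ring
    rw [List.filter_cons, hcast]
    have iht := ih (n + 1)
    push_cast at iht
    by_cases hc : c = '`'
    · simp [hc, posIdx, iht]
    · simp [hc, posIdx, iht]

theorem pairTicks_map (ns : List Nat) :
    pairTicks (ns.map (Nat.cast : Nat → Int)) = pairNat ns := by
  induction ns using pairNat.induct with
  | case1 s e rest ih => simp only [List.map_cons, pairTicks, pairNat, ih]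
  | case2 ns h => cases ns with
    | nil => rfl
    | cons a t => cases t with
      | nil => rfl
      | cons b r => exact absurd rfl (h a b r)

-- ===== VERDICT (by name: the statement is the Claim_ definition above) =====
theorem code_spans_spec : Claim_equal_code_spans := by
  intro line _
  unfold Spec_code_spans code_spans code_spans_alt
  rw [loop_eq line.toList line.toList.length 0 [] (by omega) (by omega)]
  have h0 : (0 : Int) = ((0 : Nat) : Int) := rfl
  rw [h0, enum_filter line.toList 0, pairTicks_map]
  simp
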